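-- pv_equiv track=rewrite | github.com/softkleenex/lgcpc-2025 | 2/solution_best.py | count_exact_valid_numbers
-- ===== SOURCE A (Python) =====
-- MOD = 1000000007
--
-- def count_exact_valid_numbers(n_str, pos, digit, k):
--     """정확한 유효한 수의 개수"""
--     n = len(n_str)
--
--     # 동적 프로그래밍으로 정확히 계산
--     # 하지만 복잡성을 피하기 위해 단순 계산 사용
--
--     result = 1
--     for i in range(n):
--         if i == pos:
--             continue
--
--         limit = int(n_str[i])
--         count = 0
--         for d in range(1 if i == 0 else 0, limit + 1):
--             if d != k:
--                 count += 1
--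
--         result = (result * count) % MOD
--         if count == 0:
--             return 0
--
--     return result
-- ===== SOURCE B (Python) =====
-- MOD = 1000000007
--
-- def count_exact_valid_numbers(n_str, pos, digit, k):
--     result = 1
--     for i, ch in enumerate(n_str):
--         if i == pos:
--             continue
--         lo = 1 if i == 0 else 0
--         limit = int(ch)
--         cnt = (limit - lo + 1) - (1 if lo <= k <= limit else 0)
--         result = result * cnt % MOD
--     return result
-- ===== Notes on version B (the rewrite author's own statement) =====
-- stated objective: simpler
-- what changed: The inner loop over digits 0..limit counting d != k is replaced by the closed-form count (limit - lo + 1) - (1 if lo <= k <= limit else 0), and the early return 0 is dropped since a zero factor already makes the whole product 0.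
-- outside the precondition, e.g. on count_exact_valid_numbers('0x', 2, 0, 5): A returns 0, B raises ValueError
import Mathlib
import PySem

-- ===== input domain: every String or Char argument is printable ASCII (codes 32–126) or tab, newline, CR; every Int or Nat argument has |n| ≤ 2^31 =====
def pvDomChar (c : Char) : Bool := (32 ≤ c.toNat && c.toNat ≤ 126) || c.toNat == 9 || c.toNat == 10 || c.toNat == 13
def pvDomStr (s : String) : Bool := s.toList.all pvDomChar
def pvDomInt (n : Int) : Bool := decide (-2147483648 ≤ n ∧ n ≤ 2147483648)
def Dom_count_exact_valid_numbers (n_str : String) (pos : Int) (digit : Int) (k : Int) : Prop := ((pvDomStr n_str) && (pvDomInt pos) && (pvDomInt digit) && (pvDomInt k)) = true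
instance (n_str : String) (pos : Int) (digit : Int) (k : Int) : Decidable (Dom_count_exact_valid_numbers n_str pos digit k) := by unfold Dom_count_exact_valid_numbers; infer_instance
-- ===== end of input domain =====

-- B replaces A's inner digit-counting loop by a closed-form count and drops the early
-- return 0 (a zero factor keeps the modular product 0); equivalence is on the return value.

def pvMOD : Int := 1000000007

-- ===== PORT A =====
-- literal transliteration of A's indexed loop with early 'return 0'; 'none' = the
-- ValueError of int(n_str[i]) on a non-digit character (excluded by Pre_).
def aLoop (cs : List Char) (pos k : Int) (result : Int) (i : Nat) : Option Int :=
  if i < cs.length then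
    if (i : Int) = pos then aLoop cs pos k result (i + 1)
    else
      match PySem.Int.ofStr? (String.mk [cs.getD i ' ']) with
      | none => none
      | some limit =>
        let count : Int := (PySem.List.pyRange (if i = 0 then 1 else 0) (limit + 1) 1).foldl
          (fun c d => if d ≠ k then c + 1 else c) 0
        let result' := PySem.Int.mod (result * count) pvMOD
        if count = 0 then some 0 else aLoop cs pos k result' (i + 1)
  else some result
termination_by cs.length - i

def count_exact_valid_numbers (n_str : String) (pos : Int) (digit : Int) (k : Int) : Int :=
  (aLoop n_str.toList pos k 1 0).getD 0

-- ===== PORT B =====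
def bStep (pos k : Int) (acc : Option Int) (p : Int × Char) : Option Int :=
  match acc with
  | none => none
  | some result =>
    if p.1 = pos then some result
    else
      match PySem.Int.ofStr? (String.mk [p.2]) with
      | none => none
      | some limit =>
        let lo : Int := if p.1 = 0 then 1 else 0
        let cnt : Int := (limit - lo + 1) - (if lo ≤ k ∧ k ≤ limit then 1 else 0)
        some (PySem.Int.mod (result * cnt) pvMOD)

def count_exact_valid_numbers_alt (n_str : String) (pos : Int) (digit : Int) (k : Int) : Int :=
  ((PySem.List.enumerate n_str.toList 0).foldl (bStep pos k) (some 1)).getD 0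

-- ===== PRECONDITION & SPEC =====
-- Pre_ requires every character at an index other than pos to be a digit: on a
-- non-digit character at another index int() raises ValueError, except that A may
-- still return 0 when its early exit fires before the bad character while B,
-- having no early exit, reads it and raises.
def Pre_count_exact_valid_numbers (n_str : String) (pos : Int) (digit : Int) (k : Int) : Prop :=
  (PySem.List.enumerate n_str.toList 0).all (fun p => p.1 == pos || p.2.isDigit) = true
instance (n_str : String) (pos : Int) (digit : Int) (k : Int) : Decidable (Pre_count_exact_valid_numbers n_str pos digit k) := by unfold Pre_count_exact_valid_numbers; infer_instance

def pvWitness_count_exact_valid_numbers : String × Int × Int × Int := ("2x3", 1, 0, 2)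

def Spec_count_exact_valid_numbers (n_str : String) (pos : Int) (digit : Int) (k : Int) (out : Int) : Prop := out = count_exact_valid_numbers_alt n_str pos digit k
instance (n_str : String) (pos : Int) (digit : Int) (k : Int) (out : Int) : Decidable (Spec_count_exact_valid_numbers n_str pos digit k out) := by unfold Spec_count_exact_valid_numbers; infer_instance

-- ===== CLAIM (what is proved, stated in full; the proofs are below) =====
def Claim_equal_count_exact_valid_numbers : Prop := ∀ (n_str : String) (pos : Int) (digit : Int) (k : Int), Dom_count_exact_valid_numbers n_str pos digit k → Pre_count_exact_valid_numbers n_str pos digit k → Spec_count_exact_valid_numbers n_str pos digit k (count_exact_valid_numbers n_str pos digit k)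

-- ===== LEMMAS AND PROOFS =====

-- a digit character is one of the ten digit literals
theorem digit_cases (c : Char) (h : c.isDigit = true) :
    c = '0' ∨ c = '1' ∨ c = '2' ∨ c = '3' ∨ c = '4' ∨ c = '5' ∨ c = '6' ∨ c = '7' ∨ c = '8' ∨ c = '9' := by
  have hb : 48 ≤ c.toNat ∧ c.toNat ≤ 57 := by
    simp [Char.isDigit] at h
    exact ⟨h.1, h.2⟩
  obtain ⟨hb1, hb2⟩ := hb
  have hv : c.toNat = 48 ∨ c.toNat = 49 ∨ c.toNat = 50 ∨ c.toNat = 51 ∨ c.toNat = 52 ∨ c.toNat = 53 ∨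
      c.toNat = 54 ∨ c.toNat = 55 ∨ c.toNat = 56 ∨ c.toNat = 57 := by omega
  have key : ∀ (d : Char), c.toNat = d.toNat → c = d := fun d hd => Char.ext (UInt32.toNat_inj.mp hd)
  rcases hv with h|h|h|h|h|h|h|h|h|h
  · exact Or.inl (key '0' h)
  · exact Or.inr (Or.inl (key '1' h))
  · exact Or.inr (Or.inr (Or.inl (key '2' h)))
  · exact Or.inr (Or.inr (Or.inr (Or.inl (key '3' h))))
  · exact Or.inr (Or.inr (Or.inr (Or.inr (Or.inl (key '4' h)))))
  · exact Or.inr (Or.inr (Or.inr (Or.inr (Or.inr (Or.inl (key '5' h))))))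
  · exact Or.inr (Or.inr (Or.inr (Or.inr (Or.inr (Or.inr (Or.inl (key '6' h)))))))
  · exact Or.inr (Or.inr (Or.inr (Or.inr (Or.inr (Or.inr (Or.inr (Or.inl (key '7' h))))))))
  · exact Or.inr (Or.inr (Or.inr (Or.inr (Or.inr (Or.inr (Or.inr (Or.inr (Or.inl (key '8' h)))))))))
  · exact Or.inr (Or.inr (Or.inr (Or.inr (Or.inr (Or.inr (Or.inr (Or.inr (Or.inr (key '9' h)))))))))

theorem ofStr_digit (c : Char) (h : c.isDigit = true) :
    ∃ v : Int, PySem.Int.ofStr? (String.mk [c]) = some v ∧ 0 ≤ v ∧ v ≤ 9 := by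
  rcases digit_cases c h with h|h|h|h|h|h|h|h|h|h <;> subst h
  · exact ⟨0, by decide, by decide, by decide⟩
  · exact ⟨1, by decide, by decide, by decide⟩
  · exact ⟨2, by decide, by decide, by decide⟩
  · exact ⟨3, by decide, by decide, by decide⟩
  · exact ⟨4, by decide, by decide, by decide⟩
  · exact ⟨5, by decide, by decide, by decide⟩
  · exact ⟨6, by decide, by decide, by decide⟩
  · exact ⟨7, by decide, by decide, by decide⟩
  · exact ⟨8, by decide, by decide, by decide⟩
  · exact ⟨9, by decide, by decide, by decide⟩

-- the inner counting loop of A in closed form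
theorem count_closed (k : Int) : ∀ (n : Nat) (a b c0 : Int), b - a = (n : Int) →
    (PySem.List.pyRange a b 1).foldl (fun c d => if d ≠ k then c + 1 else c) c0
      = c0 + (b - a) - (if a ≤ k ∧ k < b then 1 else 0) := by
  intro n
  induction n with
  | zero =>
    intro a b c0 hab
    rw [PySem.List.pyRange_one_eq_nil (by omega)]
    simp; omega
  | succ m ih =>
    intro a b c0 hab
    rw [PySem.List.pyRange_one_cons (by omega)]
    simp only [List.foldl_cons]
    rw [ih (a + 1) b _ (by omega)]
    by_cases hk : a = k <;> simp [hk] <;> split_ifs <;> omega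

-- folding B's step from an accumulator 0 stays 0 (characters off pos are digits)
theorem zero_fold (pos k : Int) : ∀ (l : List (Int × Char)),
    (∀ p ∈ l, p.1 = pos ∨ (p.2).isDigit = true) →
    l.foldl (bStep pos k) (some 0) = some 0 := by
  intro l
  induction l with
  | nil => intro _; rfl
  | cons p rest ih =>
    intro h
    have htl : ∀ q ∈ rest, q.1 = pos ∨ (q.2).isDigit = true := fun q hq => h q (List.mem_cons_of_mem _ hq)
    by_cases hp : p.1 = pos
    · simp only [List.foldl_cons, bStep, hp]
      exact ih htl
    · have hd := (h p (List.mem_cons_self ..)).resolve_left hp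
      obtain ⟨v, hv, _, _⟩ := ofStr_digit p.2 hd
      simp only [List.foldl_cons, bStep, if_neg hp, hv]
      have : PySem.Int.mod (0 * ((v - (if p.1 = 0 then 1 else 0) + 1) -
          (if (if p.1 = 0 then 1 else 0) ≤ k ∧ k ≤ v then 1 else 0))) pvMOD = 0 := by
        simp [PySem.Int.mod, pvMOD]
      rw [this]
      exact ih htl

theorem aLoop_eq (cs : List Char) (pos k : Int)
    (hd : ∀ (j : Nat), j < cs.length → (j : Int) = pos ∨ cs[j]!.isDigit = true) :
    ∀ (n i : Nat) (result : Int), cs.length - i = n →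
      aLoop cs pos k result i
        = (PySem.List.enumerate (cs.drop i) (i : Int)).foldl (bStep pos k) (some result) := by
  intro n
  induction n with
  | zero =>
    intro i result hn
    have hge : cs.length ≤ i := by omega
    rw [aLoop, if_neg (by omega), List.drop_of_length_le hge]
    rfl
  | succ m ih =>
    intro i result hn
    have hi : i < cs.length := by omega
    have hdrop : cs.drop i = cs[i] :: cs.drop (i + 1) := List.drop_eq_getElem_cons hi
    have hcast : ((i : Int) + 1) = ((i + 1 : Nat) : Int) := by push_cast; ring
    rw [aLoop, if_pos hi, hdrop, PySem.List.enumerate_cons, List.foldl_cons, hcast]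
    by_cases hp : (i : Int) = pos
    · simp only [hp, bStep]
      exact ih (i + 1) result (by omega)
    · have hdig : cs[i].isDigit = true := by
        have := (hd i hi).resolve_left hp
        rwa [List.getElem!_eq_getElem?_getD, List.getElem?_eq_getElem hi] at this
      obtain ⟨v, hv, hv0, hv9⟩ := ofStr_digit cs[i] hdig
      have hgetD : cs.getD i ' ' = cs[i] := List.getD_eq_getElem _ _ hi
      simp only [if_neg hp, hgetD, hv, bStep]
      -- close the inner counting loop
      set lo : Int := if (i : Int) = 0 then 1 else 0 with hlo
      have hloNat : (if i = 0 then (1 : Int) else 0) = lo := by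
        simp [hlo]
      have hlo01 : lo = 0 ∨ lo = 1 := by
        simp only [hlo]; split_ifs <;> simp
      have hcount : (PySem.List.pyRange (if i = 0 then (1 : Int) else 0) (v + 1) 1).foldl
            (fun c d => if d ≠ k then c + 1 else c) 0
          = (v - lo + 1) - (if lo ≤ k ∧ k ≤ v then 1 else 0) := by
        rw [hloNat, count_closed k (v + 1 - lo).toNat lo (v + 1) 0 (by omega)]
        have : (lo ≤ k ∧ k < v + 1) ↔ (lo ≤ k ∧ k ≤ v) := by omega
        rw [if_congr this rfl rfl]
        split_ifs <;> omega
      rw [hcount]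
      by_cases hz : (v - lo + 1) - (if lo ≤ k ∧ k ≤ v then 1 else 0) = 0
      · rw [if_pos hz, hz]
        have h0 : PySem.Int.mod (result * 0) pvMOD = 0 := by simp [PySem.Int.mod, pvMOD]
        rw [h0]
        refine (zero_fold pos k _ ?_).symm
        intro p hp'
        rcases (PySem.List.mem_enumerate_iff _ _ _).1 hp' with ⟨j, hj, rfl⟩
        rw [List.length_drop] at hj
        have hjl : i + 1 + j < cs.length := by omega
        have hget : (cs.drop (i + 1))[j] = cs[i + 1 + j] := by
          rw [List.getElem_drop]
        rcases hd (i + 1 + j) hjl with hpos | hdig2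
        · left; simpa using by push_cast at hpos ⊢; omega
        · right
          simp only [hget]
          rwa [List.getElem!_eq_getElem?_getD, List.getElem?_eq_getElem hjl] at hdig2
      · rw [if_neg hz]
        exact ih (i + 1) _ (by omega)

-- ===== VERDICT (by name: the statement is the Claim_ definition above) =====
theorem count_exact_valid_numbers_spec : Claim_equal_count_exact_valid_numbers := by
  intro n_str pos digit k _ hpre
  replace hpre : ∀ (j : Nat), j < n_str.toList.length →
      (j : Int) = pos ∨ n_str.toList[j]!.isDigit = true := by
    intro j hj
    have hall : ∀ p ∈ PySem.List.enumerate n_str.toList 0,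
        (p.1 == pos || p.2.isDigit) = true := by
      simpa [Pre_count_exact_valid_numbers, List.all_eq_true] using hpre
    have hm := hall ((0 : Int) + j, n_str.toList[j])
      ((PySem.List.mem_enumerate_iff _ _ _).2 ⟨j, hj, rfl⟩)
    simp only [Bool.or_eq_true, beq_iff_eq] at hm
    rcases hm with h | h
    · left; omega
    · right; rwa [List.getElem!_eq_getElem?_getD, List.getElem?_eq_getElem hj]
  unfold Spec_count_exact_valid_numbers count_exact_valid_numbers count_exact_valid_numbers_alt
  rw [aLoop_eq n_str.toList pos k hpre (n_str.toList.length - 0) 0 1 rfl]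
  rfl
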